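-- pv_equiv track=rewrite | github.com/jmathet/Data_Mining_firewall | data_mining/tools.py | network
-- ===== SOURCE A (Python) =====
-- import ipaddress
--
-- def network(ip1, ip2):
--     tab1 = [None]*32
--     tab2 = [None]*32
--     q1=ip1
--     q2=ip2
--     for i in range(31,-1,-1):
--         r1 = q1%2
--         q1 = q1//2
--         r2 = q2%2
--         q2 = q2//2
--         tab1[i] = r1
--         tab2[i] = r2
--     n = 0
--     net = [0]*32
--     while (n<32) and (tab1[n]==tab2[n]):
--         net[n] = 1
--         n += 1
--     net_int = int("".join(str(x) for x in net), 2)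
--     ip = ip1&net_int
--     ip = str(ipaddress.IPv4Address(ip)) + "/" + str(n)
--     return (ip)
-- ===== SOURCE B (Python) =====
-- def network(ip1, ip2):
--     a1 = ip1 % 0x100000000
--     a2 = ip2 % 0x100000000
--     n = 32 - (a1 ^ a2).bit_length()
--     mask = (0xFFFFFFFF << (32 - n)) & 0xFFFFFFFF
--     ip = ip1 & mask
--     return "%d.%d.%d.%d/%d" % (ip >> 24, (ip >> 16) & 255, (ip >> 8) & 255, ip & 255, n)
-- ===== Notes on version B (the rewrite author's own statement) =====
-- stated objective: simpler
-- what changed: Replaces the two 32-step bit-array loops, the linear prefix scan and the binary-string round-trip with direct bit arithmetic: XOR the low 32 bits, take 32 minus the bit length as the prefix length, and build the mask by a shift.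
import Mathlib
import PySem

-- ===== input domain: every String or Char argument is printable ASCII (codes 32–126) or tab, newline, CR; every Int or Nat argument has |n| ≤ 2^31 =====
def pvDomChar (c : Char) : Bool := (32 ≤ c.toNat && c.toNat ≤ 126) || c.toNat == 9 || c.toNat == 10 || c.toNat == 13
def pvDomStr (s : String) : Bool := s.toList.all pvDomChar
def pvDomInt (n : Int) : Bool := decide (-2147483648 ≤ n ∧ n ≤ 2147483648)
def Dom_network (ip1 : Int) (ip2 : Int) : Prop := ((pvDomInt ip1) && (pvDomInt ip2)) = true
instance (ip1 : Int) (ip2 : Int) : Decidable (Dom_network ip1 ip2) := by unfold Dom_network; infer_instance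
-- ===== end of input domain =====

-- B replaces A's two 32-step bit-array loops, the linear prefix scan and the binary-string
-- round-trip with direct bit arithmetic (XOR, bit_length, shift); objective: simpler.


-- ===== PORT A =====

-- str(ipaddress.IPv4Address(ip)): the dotted quad; exact for 0 ≤ ip < 2^32, which holds at
-- the call site (ip = ip1 & mask with 0 ≤ mask < 2^32).
def ipv4Str (ip : Int) : String :=
  PySem.Int.toStr (PySem.Int.mod (PySem.Int.floordiv ip 16777216) 256) ++ "." ++
  PySem.Int.toStr (PySem.Int.mod (PySem.Int.floordiv ip 65536) 256) ++ "." ++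
  PySem.Int.toStr (PySem.Int.mod (PySem.Int.floordiv ip 256) 256) ++ "." ++
  PySem.Int.toStr (PySem.Int.mod ip 256)

-- body of A's first loop; state (q1, q2, tab1, tab2); i ∈ [0, 31] so tab[i] = r is `set i.toNat`
def bitsStep (s : Int × Int × List Int × List Int) (i : Int) : Int × Int × List Int × List Int :=
  let r1 := PySem.Int.mod s.1 2
  let q1 := PySem.Int.floordiv s.1 2
  let r2 := PySem.Int.mod s.2.1 2
  let q2 := PySem.Int.floordiv s.2.1 2
  (q1, q2, s.2.2.1.set i.toNat r1, s.2.2.2.set i.toNat r2)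

-- A's while loop: `while (n<32) and (tab1[n]==tab2[n]): net[n] = 1; n += 1`; returns (net, n)
def netLoop (tab1 tab2 : List Int) (net : List Int) (n : Int) : List Int × Int :=
  if h : n < 32 ∧ PySem.List.pyGet? tab1 n = PySem.List.pyGet? tab2 n then
    netLoop tab1 tab2 (net.set n.toNat 1) (n + 1)
  else (net, n)
termination_by (32 - n).toNat
decreasing_by omega

def network (ip1 : Int) (ip2 : Int) : String :=
  -- tab1 = [None]*32, tab2 = [None]*32: placeholder 0; every entry is written before any read
  let st := (PySem.List.pyRange 31 (-1) (-1)).foldl bitsStep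
              (ip1, ip2, List.replicate 32 (0:Int), List.replicate 32 (0:Int))
  let res := netLoop st.2.2.1 st.2.2.2 (List.replicate 32 (0:Int)) 0
  -- int("".join(str(x) for x in net), 2): every x is 0 or 1, so this is the base-2 digit fold
  let netInt := res.1.foldl (fun acc d => acc * 2 + d) (0:Int)
  let ip := PySem.Int.band ip1 netInt
  ipv4Str ip ++ "/" ++ PySem.Int.toStr res.2

-- ===== PORT B =====

def network_alt (ip1 : Int) (ip2 : Int) : String :=
  let a1 := PySem.Int.mod ip1 4294967296
  let a2 := PySem.Int.mod ip2 4294967296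
  -- (a1 ^ a2).bit_length()
  let n : Int := 32 - (PySem.Int.bitLength (PySem.Int.bxor a1 a2) : Int)
  -- 0xFFFFFFFF << (32 - n): shift amount 32 - n = bit_length ≥ 0, so `<<<` by its toNat is exact
  let mask := PySem.Int.band ((4294967295 : Int) <<< (32 - n).toNat) 4294967295
  let ip := PySem.Int.band ip1 mask
  -- "%d.%d.%d.%d/%d" % (ip >> 24, (ip >> 16) & 255, (ip >> 8) & 255, ip & 255, n)
  PySem.Int.toStr (ip >>> (24:Nat)) ++ "." ++
    PySem.Int.toStr (PySem.Int.band (ip >>> (16:Nat)) 255) ++ "." ++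
    PySem.Int.toStr (PySem.Int.band (ip >>> (8:Nat)) 255) ++ "." ++
    PySem.Int.toStr (PySem.Int.band ip 255) ++ "/" ++ PySem.Int.toStr n

-- ===== PRECONDITION & SPEC =====
def Spec_network (ip1 : Int) (ip2 : Int) (out : String) : Prop := out = network_alt ip1 ip2
instance (ip1 : Int) (ip2 : Int) (out : String) : Decidable (Spec_network ip1 ip2 out) := by unfold Spec_network; infer_instance

-- ===== CLAIM (what is proved, stated in full; the proofs are below) =====
def Claim_equal_network : Prop := ∀ (ip1 : Int) (ip2 : Int), Dom_network ip1 ip2 → Spec_network ip1 ip2 (network ip1 ip2)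

-- ===== LEMMAS AND PROOFS =====

-- what A's first loop leaves in a tab: positions k-1 … 0 filled, most significant bit first
def writeTab (q : Int) : Nat → List Int → List Int
  | 0, t => t
  | k + 1, t => writeTab (PySem.Int.floordiv q 2) k (t.set k (PySem.Int.mod q 2))

theorem bitsFold (k : Nat) : ∀ (q1 q2 : Int) (t1 t2 : List Int),
    (PySem.List.pyRange ((k : Int) - 1) (-1) (-1)).foldl bitsStep (q1, q2, t1, t2) =
      (PySem.Int.floordiv q1 (2 ^ k), PySem.Int.floordiv q2 (2 ^ k),
        writeTab q1 k t1, writeTab q2 k t2) := by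
  induction k with
  | zero =>
    intro q1 q2 t1 t2
    rw [PySem.List.pyRange_neg_one_eq_nil (by norm_num)]
    simp [writeTab]
  | succ k ih =>
    intro q1 q2 t1 t2
    have h1 : ((k + 1 : Nat) : Int) - 1 = (k : Int) := by push_cast; ring
    rw [h1, PySem.List.pyRange_neg_one_cons (by omega)]
    simp only [List.foldl_cons, bitsStep, Int.toNat_natCast, ih, writeTab]
    have hdd : ∀ q : Int, PySem.Int.floordiv (PySem.Int.floordiv q 2) (2 ^ k) =
        PySem.Int.floordiv q (2 ^ (k + 1)) := by
      intro q
      rw [PySem.Int.floordiv_eq_ediv_of_pos (by norm_num),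
        PySem.Int.floordiv_eq_ediv_of_pos (by positivity),
        PySem.Int.floordiv_eq_ediv_of_pos (by positivity),
        Int.ediv_ediv_of_nonneg (by norm_num), pow_succ, mul_comm]
    rw [hdd, hdd]

theorem writeTab_get (k : Nat) : ∀ (q : Int) (t : List Int), k ≤ t.length → ∀ (j : Nat),
    (writeTab q k t)[j]? = if j < k
      then some (PySem.Int.mod (PySem.Int.floordiv q (2 ^ (k - 1 - j))) 2)
      else t[j]? := by
  induction k with
  | zero => intro q t _ j; simp [writeTab]
  | succ k ih =>
    intro q t hk j
    rw [writeTab, ih _ _ (by simpa using Nat.le_of_succ_le hk) j]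
    have hdd : ∀ (q : Int) (m : Nat), PySem.Int.floordiv (PySem.Int.floordiv q 2) (2 ^ m) =
        PySem.Int.floordiv q (2 ^ (m + 1)) := by
      intro q m
      rw [PySem.Int.floordiv_eq_ediv_of_pos (by norm_num),
        PySem.Int.floordiv_eq_ediv_of_pos (by positivity),
        PySem.Int.floordiv_eq_ediv_of_pos (by positivity),
        Int.ediv_ediv_of_nonneg (by norm_num), pow_succ, mul_comm]
    by_cases hjk : j < k
    · rw [if_pos hjk, if_pos (by omega), hdd]
      have he : k - 1 - j + 1 = k + 1 - 1 - j := by omega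
      rw [he]
    · rw [if_neg hjk]
      by_cases hje : j = k
      · subst hje
        rw [if_pos (by omega)]
        rw [List.getElem?_set_self (by omega)]
        have hz : j + 1 - 1 - j = 0 := by omega
        rw [hz, pow_zero, PySem.Int.floordiv_eq_ediv_of_pos (by norm_num : (0:Int) < 1),
          Int.ediv_one]
      · rw [if_neg (by omega), List.getElem?_set_ne (by omega)]

-- the tab entry at j is bit (31 - j) of the address reduced mod 2^32
theorem bit_eq_testBit (a : Int) (i : Nat) (hi : i < 32) :
    PySem.Int.mod (PySem.Int.floordiv a (2 ^ i)) 2 =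
      if (a % 4294967296).toNat.testBit i then 1 else 0 := by
  obtain ⟨n, hn, hnlt⟩ : ∃ n : Nat, a % 4294967296 = (n : Int) ∧ n < 2 ^ 32 :=
    ⟨(a % 4294967296).toNat, by omega, by omega⟩
  rw [PySem.Int.floordiv_eq_ediv_of_pos (by positivity),
    PySem.Int.mod_eq_emod_of_pos (by norm_num), hn, Int.toNat_natCast]
  have hpow : (4294967296 : Int) = 2 ^ i * 2 ^ (32 - i) := by
    rw [← pow_add]
    have : i + (32 - i) = 32 := by omega
    rw [this]
    norm_num
  have hdecomp : a = (n : Int) + (a / 4294967296) * 4294967296 := by omega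
  have hdiv : a / 2 ^ i = (n : Int) / 2 ^ i + (a / 4294967296) * 2 ^ (32 - i) := by
    calc a / 2 ^ i = ((n : Int) + ((a / 4294967296) * 2 ^ (32 - i)) * 2 ^ i) / 2 ^ i := by
          rw [mul_assoc, mul_comm ((2:Int) ^ (32 - i)) (2 ^ i), ← hpow, ← hdecomp]
      _ = (n : Int) / 2 ^ i + (a / 4294967296) * 2 ^ (32 - i) :=
          Int.add_mul_ediv_right _ _ (by positivity)
  rw [hdiv]
  obtain ⟨c, hc⟩ : (2:Int) ∣ 2 ^ (32 - i) := dvd_pow_self 2 (by omega)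
  have hmod2 : ((n : Int) / 2 ^ i + a / 4294967296 * 2 ^ (32 - i)) % 2 = (n : Int) / 2 ^ i % 2 := by
    rw [hc]
    have : a / 4294967296 * (2 * c) = a / 4294967296 * c * 2 := by ring
    rw [this]
    exact Int.add_mul_emod_self_right ((n : Int) / 2 ^ i) _ _
  rw [hmod2]
  have hcast : ((n : Int)) / 2 ^ i % 2 = ((n / 2 ^ i % 2 : Nat) : Int) := by
    push_cast
    rfl
  rw [hcast, Nat.testBit_eq_decide_div_mod_eq]
  rcases Nat.mod_two_eq_zero_or_one (n / 2 ^ i) with h0 | h1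
  · rw [h0]
    simp
  · rw [h1]
    simp

-- the shape A's while loop leaves in `net`
def foldOnes : List Int → Nat → Nat → List Int
  | net, _, 0 => net
  | net, k, s + 1 => foldOnes (net.set k 1) (k + 1) s

theorem netLoop_eq (t1 t2 : List Int) (stop : Nat) (hst : stop ≤ 32)
    (hag : ∀ j : Nat, j < stop → t1[j]? = t2[j]?)
    (hstopc : stop = 32 ∨ t1[stop]? ≠ t2[stop]?) :
    ∀ (s k : Nat) (net : List Int), k + s = stop →
      netLoop t1 t2 net (k : Int) = (foldOnes net k s, (stop : Int)) := by
  intro s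
  induction s with
  | zero =>
    intro k net hk
    have hk' : k = stop := by omega
    subst hk'
    rw [netLoop]
    rcases hstopc with h32 | hne
    · rw [dif_neg (by omega)]
      simp [foldOnes, h32]
    · rw [dif_neg]
      · simp [foldOnes]
      · rintro ⟨-, heq⟩
        rw [PySem.List.pyGet?_natCast, PySem.List.pyGet?_natCast] at heq
        exact hne heq
  | succ s ih =>
    intro k net hk
    rw [netLoop, dif_pos]
    · have h1 : (k : Int) + 1 = ((k + 1 : Nat) : Int) := by push_cast; ring
      rw [Int.toNat_natCast, h1, ih (k + 1) (net.set k 1) (by omega)]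
      rfl
    · constructor
      · omega
      · rw [PySem.List.pyGet?_natCast, PySem.List.pyGet?_natCast]
        exact hag k (by omega)

-- the base-2 digit fold of the ones-then-zeros net equals B's shifted mask, for every prefix length
theorem foldOnes_mask : ∀ s : Nat, s ≤ 32 →
    (foldOnes (List.replicate 32 (0:Int)) 0 s).foldl (fun acc d => acc * 2 + d) (0:Int) =
      PySem.Int.band ((4294967295 : Int) <<< (32 - s)) 4294967295 := by
  decide

theorem band_bounds (a m : Int) (hm : 0 ≤ m) :
    0 ≤ PySem.Int.band a m ∧ PySem.Int.band a m ≤ m := by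
  unfold PySem.Int.band
  by_cases h : 0 ≤ a
  · rw [if_pos h, if_pos hm]
    have := Nat.and_le_right (n := a.toNat) (m := m.toNat)
    omega
  · rw [if_neg h, if_pos hm]
    have := Nat.sub_le m.toNat (m.toNat &&& (-a - 1).toNat)
    omega

-- A's library call and B's hand formatting agree on the 32-bit values both produce
theorem ipv4Str_eq (ip : Int) (h0 : 0 ≤ ip) (hlt : ip < 4294967296) :
    ipv4Str ip = PySem.Int.toStr (ip >>> (24:Nat)) ++ "." ++
      PySem.Int.toStr (PySem.Int.band (ip >>> (16:Nat)) 255) ++ "." ++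
      PySem.Int.toStr (PySem.Int.band (ip >>> (8:Nat)) 255) ++ "." ++
      PySem.Int.toStr (PySem.Int.band ip 255) := by
  obtain ⟨m, hm, hmlt⟩ : ∃ m : Nat, ip = (m : Int) ∧ m < 4294967296 :=
    ⟨ip.toNat, by omega, by omega⟩
  subst hm
  have hsh : ∀ k : Nat, ((m : Int) >>> k) = ((m >>> k : Nat) : Int) := by
    simp [Int.natCast_shiftRight]
  have eband : ∀ k : Nat, PySem.Int.band ((m : Int) >>> k) 255 =
      ((m >>> k &&& 255 : Nat) : Int) := by
    intro k
    rw [hsh k]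
    exact_mod_cast PySem.Int.band_natCast (m >>> k) 255
  have hb255 : ∀ j : Nat, j &&& 255 = j % 256 := by
    intro j
    have := Nat.and_two_pow_sub_one_eq_mod j 8
    norm_num at this
    omega
  unfold ipv4Str
  have e24 : PySem.Int.mod (PySem.Int.floordiv (m : Int) 16777216) 256 =
      (m : Int) >>> (24:Nat) := by
    have h1 : PySem.Int.floordiv (m : Int) 16777216 = ((m / 16777216 : Nat) : Int) := by
      exact_mod_cast PySem.Int.floordiv_natCast m 16777216
    have h2 : PySem.Int.mod ((m / 16777216 : Nat) : Int) 256 =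
        ((m / 16777216 % 256 : Nat) : Int) := by
      exact_mod_cast PySem.Int.mod_natCast (m / 16777216) 256
    rw [h1, h2, hsh 24, Nat.shiftRight_eq_div_pow]
    have hp : (2:Nat) ^ 24 = 16777216 := by norm_num
    rw [hp]
    omega
  have e16 : PySem.Int.mod (PySem.Int.floordiv (m : Int) 65536) 256 =
      PySem.Int.band ((m : Int) >>> (16:Nat)) 255 := by
    have h1 : PySem.Int.floordiv (m : Int) 65536 = ((m / 65536 : Nat) : Int) := by
      exact_mod_cast PySem.Int.floordiv_natCast m 65536
    have h2 : PySem.Int.mod ((m / 65536 : Nat) : Int) 256 =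
        ((m / 65536 % 256 : Nat) : Int) := by
      exact_mod_cast PySem.Int.mod_natCast (m / 65536) 256
    rw [h1, h2, eband 16, hb255, Nat.shiftRight_eq_div_pow]
  have e8 : PySem.Int.mod (PySem.Int.floordiv (m : Int) 256) 256 =
      PySem.Int.band ((m : Int) >>> (8:Nat)) 255 := by
    have h1 : PySem.Int.floordiv (m : Int) 256 = ((m / 256 : Nat) : Int) := by
      exact_mod_cast PySem.Int.floordiv_natCast m 256
    have h2 : PySem.Int.mod ((m / 256 : Nat) : Int) 256 =
        ((m / 256 % 256 : Nat) : Int) := by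
      exact_mod_cast PySem.Int.mod_natCast (m / 256) 256
    rw [h1, h2, eband 8, hb255, Nat.shiftRight_eq_div_pow]
  have e0 : PySem.Int.mod (m : Int) 256 = PySem.Int.band (m : Int) 255 := by
    have h2 : PySem.Int.mod ((m : Nat) : Int) 256 = ((m % 256 : Nat) : Int) := by
      exact_mod_cast PySem.Int.mod_natCast m 256
    have hb : PySem.Int.band ((m : Nat) : Int) 255 = ((m &&& 255 : Nat) : Int) := by
      exact_mod_cast PySem.Int.band_natCast m 255
    rw [h2, hb, hb255]
  rw [e24, e16, e8, e0]

theorem network_eq (ip1 ip2 : Int) : network ip1 ip2 = network_alt ip1 ip2 := by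
  -- the two addresses reduced to their low 32 bits
  obtain ⟨a, ha, ha2⟩ : ∃ a : Nat, ip1 % 4294967296 = (a : Int) ∧ a < 2 ^ 32 := by
    refine ⟨(ip1 % 4294967296).toNat, by omega, by omega⟩
  obtain ⟨b, hb, hb2⟩ : ∃ b : Nat, ip2 % 4294967296 = (b : Int) ∧ b < 2 ^ 32 := by
    refine ⟨(ip2 % 4294967296).toNat, by omega, by omega⟩
  set x : Nat := a ^^^ b with hxdef
  have hx32 : x < 2 ^ 32 := Nat.xor_lt_two_pow ha2 hb2
  set L : Nat := PySem.Int.bitLength (x : Int) with hLdef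
  have hxlt : x < 2 ^ L := by
    have := PySem.Int.lt_two_pow_bitLength (x : Int)
    simpa using this
  have hL32 : L ≤ 32 := by
    by_contra hgt
    have hxne : ((x : Int)) ≠ 0 := by
      intro h0
      have : x = 0 := by exact_mod_cast h0
      rw [this] at hLdef
      simp only [Nat.cast_zero, PySem.Int.bitLength_zero] at hLdef
      omega
    have hle := PySem.Int.two_pow_bitLength_le (x : Int) hxne
    rw [← hLdef] at hle
    have : (2:Nat) ^ 32 ≤ 2 ^ (L - 1) := Nat.pow_le_pow_right (by norm_num) (by omega)
    simp only [Int.natAbs_natCast] at hle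
    omega
  set stop : Nat := 32 - L with hstopdef
  -- bit agreement below stop, disagreement at stop
  have hbitlow : ∀ j : Nat, j < stop → x.testBit (31 - j) = false := by
    intro j hj
    exact Nat.testBit_lt_two_pow (lt_of_lt_of_le hxlt (Nat.pow_le_pow_right (by norm_num) (by omega)))
  have hbithigh : L ≠ 0 → x.testBit (31 - stop) = true := by
    intro hL0
    have hxne : x ≠ 0 := by
      intro h0
      rw [h0] at hLdef
      simp only [Nat.cast_zero, PySem.Int.bitLength_zero] at hLdef
      omega
    have hge := PySem.Int.two_pow_bitLength_le (x : Int) (by exact_mod_cast hxne)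
    rw [← hLdef] at hge
    simp only [Int.natAbs_natCast] at hge
    have h31 : 31 - stop = L - 1 := by omega
    rw [h31, Nat.testBit_eq_decide_div_mod_eq]
    have hdiv1 : x / 2 ^ (L - 1) = 1 := by
      have hub : x < 2 ^ (L - 1) * 2 := by
        rw [← pow_succ]
        have : L - 1 + 1 = L := by omega
        rw [this]; exact hxlt
      have h1 : 1 ≤ x / 2 ^ (L - 1) := (Nat.le_div_iff_mul_le (by positivity)).2 (by omega)
      have h2 : x / 2 ^ (L - 1) < 2 := Nat.div_lt_of_lt_mul (by omega)
      omega
    simp [hdiv1]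
  -- the tabs A builds
  have htab : ∀ (ip : Int) (c : Nat), ip % 4294967296 = (c : Int) → ∀ j : Nat,
      (writeTab ip 32 (List.replicate 32 (0:Int)))[j]? =
        if h : j < 32 then some (if c.testBit (31 - j) then 1 else 0) else none := by
    intro ip c hc j
    rw [writeTab_get 32 ip _ (by simp) j]
    by_cases hj : j < 32
    · rw [if_pos hj, dif_pos hj, bit_eq_testBit ip (32 - 1 - j) (by omega), hc]
      have : 32 - 1 - j = 31 - j := by omega
      rw [this]
      simp
    · rw [if_neg hj, dif_neg hj]
      rw [List.getElem?_eq_none_iff, List.length_replicate]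
      omega
  have htest : ∀ j : Nat, (x.testBit j = false) → a.testBit j = b.testBit j := by
    intro j hfalse
    have := Nat.testBit_xor a b j
    rw [← hxdef] at this
    rw [hfalse] at this
    cases h1 : a.testBit j <;> cases h2 : b.testBit j <;> simp [h1, h2] at this ⊢
  -- run A, then rewrite both sides to the common form
  have hfold := bitsFold 32 ip1 ip2 (List.replicate 32 (0:Int)) (List.replicate 32 (0:Int))
  have h31 : ((32 : Nat) : Int) - 1 = 31 := by norm_num
  rw [h31] at hfold
  have hnet := netLoop_eq (writeTab ip1 32 (List.replicate 32 (0:Int)))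
      (writeTab ip2 32 (List.replicate 32 (0:Int))) stop (by omega)
      (by
        intro j hj
        rw [htab ip1 a ha j, htab ip2 b hb j]
        rw [dif_pos (by omega : j < 32), dif_pos (by omega : j < 32)]
        rw [htest (31 - j) (hbitlow j hj)])
      (by
        by_cases hL0 : L = 0
        · left; omega
        · right
          rw [htab ip1 a ha stop, htab ip2 b hb stop]
          rw [dif_pos (by omega : stop < 32), dif_pos (by omega : stop < 32)]
          have hne := hbithigh hL0
          have hx := Nat.testBit_xor a b (31 - stop)
          rw [← hxdef, hne] at hx
          intro hcontra
          cases h1 : a.testBit (31 - stop) <;> cases h2 : b.testBit (31 - stop) <;>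
            simp [h1, h2] at hx hcontra)
      stop 0 (List.replicate 32 (0:Int)) (by omega)
  have h0 : ((0 : Nat) : Int) = 0 := rfl
  rw [h0] at hnet
  simp only [network, network_alt, hfold, hnet]
  rw [PySem.Int.mod_eq_emod_of_pos (by norm_num : (0:Int) < 4294967296),
    PySem.Int.mod_eq_emod_of_pos (by norm_num : (0:Int) < 4294967296),
    ha, hb, PySem.Int.bxor_natCast, ← hxdef, ← hLdef]
  rw [foldOnes_mask stop (by omega)]
  have hsh : (32 - (32 - (L : Int))).toNat = 32 - stop := by omega
  rw [hsh]
  have hnn : ((stop : Nat) : Int) = 32 - (L : Int) := by omega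
  rw [hnn]
  have hM := band_bounds ((4294967295:Int) <<< (32 - stop)) 4294967295 (by norm_num)
  have hip := band_bounds ip1 (PySem.Int.band ((4294967295:Int) <<< (32 - stop)) 4294967295) hM.1
  rw [ipv4Str_eq _ hip.1 (by omega)]

-- ===== VERDICT (by name: the statement is the Claim_ definition above) =====
theorem network_spec : Claim_equal_network := by
  intro ip1 ip2 _
  unfold Spec_network
  exact network_eq ip1 ip2
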